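-- pv_equiv track=rewrite | github.com/minhtri6179/160Question | hashMap/validSubSeq.py | val1
-- ===== SOURCE A (Python) =====
-- def val1(arr, seq):
--     idxArr = 0
--     countEqual = 0
--     for seqNum in seq:
--         for i in range(idxArr, len(arr)):
--             if seqNum == arr[i]:
--                 countEqual += 1
--                 idxArr = i+1
--                 break
--     return countEqual == len(seq)
-- ===== SOURCE B (Python) =====
-- def val1(arr, seq):
--     j = 0
--     for x in arr:
--         if j < len(seq) and x == seq[j]:
--             j += 1
--     return j == len(seq)
-- ===== Notes on version B (the rewrite author's own statement) =====
-- stated objective: faster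
-- what changed: Replaced the per-seq-element rescans of arr (restarting from a stuck index when an element is missing) by a single two-pointer pass over arr that advances a pointer into seq on each match.
import Mathlib
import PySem

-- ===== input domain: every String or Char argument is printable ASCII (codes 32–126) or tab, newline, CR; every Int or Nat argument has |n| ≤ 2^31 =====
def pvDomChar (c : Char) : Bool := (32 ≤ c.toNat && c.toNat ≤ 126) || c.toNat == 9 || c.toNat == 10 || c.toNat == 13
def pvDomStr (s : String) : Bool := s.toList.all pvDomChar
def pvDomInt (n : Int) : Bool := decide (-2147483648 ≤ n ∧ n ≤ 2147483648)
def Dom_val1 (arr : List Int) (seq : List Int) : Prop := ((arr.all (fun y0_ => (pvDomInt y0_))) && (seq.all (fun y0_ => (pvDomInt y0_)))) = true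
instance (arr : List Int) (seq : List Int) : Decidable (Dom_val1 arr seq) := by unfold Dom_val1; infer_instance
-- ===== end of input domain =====

-- B replaces A's per-seq-element rescans of arr (which restart from a stuck index when an
-- element is missing) by a single two-pointer pass over arr; objective: faster.

-- ===== PORT A =====
-- inner loop `for i in range(idxArr, len(arr)): … break`; st = (idxArr, countEqual)
def val1Inner (arr : List Int) (seqNum : Int) (st : Int × Int) : List Int → Int × Int
  | [] => st
  | i :: rest =>
    if some seqNum = PySem.List.pyGet? arr i then (i + 1, st.2 + 1)
    else val1Inner arr seqNum st rest

def val1 (arr : List Int) (seq : List Int) : Bool :=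
  (seq.foldl (fun st seqNum =>
    val1Inner arr seqNum st (PySem.List.pyRange st.1 (arr.length : Int) 1)) ((0 : Int), (0 : Int))).2
  == (seq.length : Int)

-- ===== PORT B =====
-- single pass over arr; j points into seq and advances on each match
def val1_alt (arr : List Int) (seq : List Int) : Bool :=
  (arr.foldl (fun (j : Nat) x =>
    if h : j < seq.length then (if x = seq[j] then j + 1 else j) else j) 0) == seq.length

-- ===== PRECONDITION & SPEC =====
def Spec_val1 (arr : List Int) (seq : List Int) (out : Bool) : Prop := out = val1_alt arr seq
instance (arr : List Int) (seq : List Int) (out : Bool) : Decidable (Spec_val1 arr seq out) := by unfold Spec_val1; infer_instance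

-- ===== CLAIM (what is proved, stated in full; the proofs are below) =====
def Claim_equal_val1 : Prop := ∀ (arr : List Int) (seq : List Int), Dom_val1 arr seq → Spec_val1 arr seq (val1 arr seq)

-- ===== LEMMAS AND PROOFS =====

-- A's count, structured over seq: per element, first occurrence in the remaining suffix of arr
def arec : List Int → List Int → Nat
  | _, [] => 0
  | arrRest, s :: rest =>
    match arrRest.findIdx? (· == s) with
    | some k => 1 + arec (arrRest.drop (k + 1)) rest
    | none => arec arrRest rest

-- B's count, structured over arr: greedy two-pointer match length
def gcount : List Int → List Int → Nat
  | [], _ => 0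
  | _ :: _, [] => 0
  | x :: arr', s :: rest => if x = s then 1 + gcount arr' rest else gcount arr' (s :: rest)

theorem val1Inner_eq_aux (arr : List Int) (s : Int) (st : Int × Int) :
    ∀ (fuel n : Nat), arr.length - n = fuel → n ≤ arr.length →
    val1Inner arr s st (PySem.List.pyRange (n : Int) (arr.length : Int) 1) =
      (match (arr.drop n).findIdx? (· == s) with
       | some k => ((n : Int) + k + 1, st.2 + 1)
       | none => st) := by
  intro fuel
  induction fuel with
  | zero =>
    intro n hf hn
    have hn' : n = arr.length := by omega
    subst hn'
    rw [PySem.List.pyRange_one_eq_nil (by omega)]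
    simp [val1Inner, List.drop_of_length_le (le_refl _)]
  | succ fuel ih =>
    intro n hf hn
    have hlt : n < arr.length := by omega
    rw [PySem.List.pyRange_one_cons (by exact_mod_cast hlt)]
    have hget : PySem.List.pyGet? arr (n : Int) = some arr[n] := by
      rw [PySem.List.pyGet?_natCast]; simp [List.getElem?_eq_getElem hlt]
    rw [List.drop_eq_getElem_cons hlt, List.findIdx?_cons]
    by_cases hs : arr[n] = s
    · simp [val1Inner, hget, hs]
    · have hcond : ¬ (some s = PySem.List.pyGet? arr (n : Int)) := by
        rw [hget]; simp; intro h; exact hs h.symm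
      have hcast : (n : Int) + 1 = ((n + 1 : Nat) : Int) := by push_cast; ring
      simp only [val1Inner, if_neg hcond]
      rw [hcast, ih (n + 1) (by omega) (by omega)]
      have hbs : (arr[n] == s) = false := by simp [hs]
      rw [hbs]
      cases hfi : (arr.drop (n + 1)).findIdx? (· == s) with
      | none => simp
      | some k => simp; omega
   
theorem val1Inner_eq (arr : List Int) (s : Int) (st : Int × Int) (n : Nat) (hn : n ≤ arr.length) :
    val1Inner arr s st (PySem.List.pyRange (n : Int) (arr.length : Int) 1) =
      (match (arr.drop n).findIdx? (· == s) with
       | some k => ((n : Int) + k + 1, st.2 + 1)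
       | none => st) :=
  val1Inner_eq_aux arr s st (arr.length - n) n rfl hn

theorem val1_foldl_eq (arr : List Int) (seq : List Int) :
    ∀ (n : Nat) (c : Int), n ≤ arr.length →
    (seq.foldl (fun st seqNum =>
        val1Inner arr seqNum st (PySem.List.pyRange st.1 (arr.length : Int) 1)) ((n : Int), c)).2
      = c + (arec (arr.drop n) seq : Int) := by
  induction seq with
  | nil => intro n c _; simp [arec]
  | cons s rest ih =>
    intro n c hn
    rw [List.foldl_cons]
    have h1 := val1Inner_eq arr s ((n : Int), c) n hn
    cases hfi : (arr.drop n).findIdx? (· == s) with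
    | none =>
      rw [hfi] at h1; simp only [] at h1
      rw [h1, ih n c hn]
      simp [arec, hfi]
    | some k =>
      rw [hfi] at h1; simp only [] at h1
      have hk : k < (arr.drop n).length := by
        obtain ⟨h, _, _⟩ := List.findIdx?_eq_some_iff_getElem.mp hfi
        exact h
      rw [List.length_drop] at hk
      have hcast : ((n : Int) + k + 1, c + 1) = (((n + k + 1 : Nat) : Int), c + 1) := by
        push_cast; ring_nf
      rw [h1, hcast, ih (n + k + 1) (c + 1) (by omega)]
      have hdd : (arr.drop n).drop (k + 1) = arr.drop (n + k + 1) := by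
        rw [List.drop_drop]; ring_nf
      simp only [arec, hfi, hdd]
      push_cast; ring
   
theorem val1_iff (arr : List Int) (seq : List Int) :
    val1 arr seq = true ↔ arec arr seq = seq.length := by
  unfold val1
  have h := val1_foldl_eq arr seq 0 0 (Nat.zero_le _)
  simp only [Nat.cast_zero, List.drop_zero, zero_add] at h
  rw [h]
  simp [beq_iff_eq]

theorem val1_alt_foldl_eq (seq : List Int) (arr : List Int) :
    ∀ (j : Nat),
    arr.foldl (fun (j : Nat) x =>
        if h : j < seq.length then (if x = seq[j] then j + 1 else j) else j) j
      = j + gcount arr (seq.drop j) := by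
  induction arr with
  | nil =>
    intro j
    cases hd : seq.drop j with
    | nil => simp [gcount]
    | cons a l => simp [gcount]
  | cons x arr' ih =>
    intro j
    rw [List.foldl_cons]
    by_cases hj : j < seq.length
    · rw [dif_pos hj, List.drop_eq_getElem_cons hj]
      by_cases hx : x = seq[j]
      · rw [if_pos hx, ih (j + 1)]
        simp only [gcount, if_pos hx]
        omega
      · rw [if_neg hx, ih j, List.drop_eq_getElem_cons hj]
        simp only [gcount, if_neg hx]
    · rw [dif_neg hj, ih j]
      rw [List.drop_of_length_le (by omega)]
      cases arr' with
      | nil => simp [gcount]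
      | cons y l => simp [gcount]

theorem val1_alt_iff (arr : List Int) (seq : List Int) :
    val1_alt arr seq = true ↔ gcount arr seq = seq.length := by
  unfold val1_alt
  rw [val1_alt_foldl_eq seq arr 0]
  simp [beq_iff_eq]

theorem arec_le (seq : List Int) : ∀ (arr : List Int), arec arr seq ≤ seq.length := by
  induction seq with
  | nil => intro arr; simp [arec]
  | cons s rest ih =>
    intro arr
    simp only [arec]
    cases hfi : arr.findIdx? (· == s) with
    | none => have := ih arr; simp; omega
    | some k => have := ih (arr.drop (k + 1)); simp; omega

-- from a found first index and a sublist of the tail, rebuild the sublist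
theorem sublist_of_findIdx? (arr : List Int) (s : Int) (rest : List Int) (k : Nat)
    (hk : arr.findIdx? (· == s) = some k) (hsub : rest.Sublist (arr.drop (k + 1))) :
    (s :: rest).Sublist arr := by
  obtain ⟨hklt, hpk, _⟩ := List.findIdx?_eq_some_iff_getElem.mp hk
  have hs : arr[k] = s := by simpa using hpk
  have h1 : (s :: rest).Sublist (arr[k] :: arr.drop (k + 1)) := by
    rw [hs]; exact List.Sublist.cons₂ _ hsub
  rw [← List.drop_eq_getElem_cons hklt] at h1
  exact h1.trans (List.drop_sublist _ _)

theorem arec_iff (seq : List Int) : ∀ (arr : List Int),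
    (arec arr seq = seq.length ↔ seq.Sublist arr) := by
  induction seq with
  | nil => intro arr; simp [arec]
  | cons s rest ih =>
    intro arr
    constructor
    · intro h
      simp only [arec] at h
      cases hfi : arr.findIdx? (· == s) with
      | none =>
        rw [hfi] at h; simp only [] at h
        have := arec_le rest arr
        simp [List.length_cons] at h
        omega
      | some k =>
        rw [hfi] at h; simp only [] at h
        have hr : arec (arr.drop (k + 1)) rest = rest.length := by
          simp [List.length_cons] at h; omega
        exact sublist_of_findIdx? arr s rest k hfi ((ih _).mp hr)
    · intro h
      -- by induction on arr, greedily peeling the first occurrence of s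
      induction arr with
      | nil => simp at h
      | cons x arr' iha =>
        by_cases hx : x = s
        · subst hx
          have hrest : rest.Sublist arr' := List.cons_sublist_cons.mp h
          simp only [arec, List.findIdx?_cons]
          simp only [beq_self_eq_true, if_true]
          simp [(ih arr').mpr hrest]
          omega
        · have h' : (s :: rest).Sublist arr' := by
            cases h with
            | cons _ h2 => exact h2
            | cons₂ => exact absurd rfl hx
          have hmem : s ∈ arr' := h'.subset (List.mem_cons_self)
          cases hfi : arr'.findIdx? (· == s) with
          | none =>
            exfalso
            have := List.findIdx?_eq_none_iff.mp hfi s hmem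
            simp at this
          | some k =>
            have hbx : (x == s) = false := by simp [hx]
            have hstep := iha h'
            simp only [arec, List.findIdx?_cons, hbx, hfi, Option.map_some] at hstep ⊢
            simpa [List.drop_drop] using hstep

theorem gcount_iff : ∀ (arr seq : List Int),
    (gcount arr seq = seq.length ↔ seq.Sublist arr) := by
  intro arr
  induction arr with
  | nil =>
    intro seq
    cases seq with
    | nil => simp [gcount]
    | cons s rest => simp [gcount]
  | cons x arr' ih =>
    intro seq
    cases seq with
    | nil => simp [gcount]
    | cons s rest =>
      by_cases hx : x = s
      · subst hx
        simp only [gcount, List.length_cons, List.cons_sublist_cons]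
        rw [← ih rest]
        simp
        omega
      · simp only [gcount, if_neg hx]
        rw [ih (s :: rest)]
        constructor
        · intro h; exact h.cons _
        · intro h
          cases h with
          | cons _ h2 => exact h2
          | cons₂ => exact absurd rfl hx

-- ===== VERDICT (by name: the statement is the Claim_ definition above) =====
theorem val1_spec : Claim_equal_val1 := by
  intro arr seq _hdom
  unfold Spec_val1
  rw [Bool.eq_iff_iff, val1_iff, val1_alt_iff, arec_iff, gcount_iff]
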